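-- pv_equiv track=rewrite | github.com/cgangEE/ohem | cleanCaffeModel.py | getCaffeIterator
-- ===== SOURCE A (Python) =====
-- def getCaffeIterator(model):
--     ret = 0
--     for c in model:
--         if c>='0' and c<='9':
--             ret = ret * 10 + int(c)
--         elif ret != 0:
--             return ret
--     return ret
-- ===== SOURCE B (Python) =====
-- def getCaffeIterator(model):
--     # tokenize: collect maximal runs of ASCII digits
--     runs = []
--     cur = ""
--     for c in model:
--         if '0' <= c <= '9':
--             cur += c
--         else:
--             if cur:
--                 runs.append(cur)
--             cur = ""
--     if cur:
--         runs.append(cur)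
--     # select: value of the first run whose integer value is nonzero
--     for r in runs:
--         v = int(r)
--         if v != 0:
--             return v
--     return 0
-- ===== Notes on version B (the rewrite author's own statement) =====
-- stated objective: alternative
-- what changed: B tokenizes the string into maximal ASCII-digit runs first and then selects the first run with nonzero integer value, instead of A's fused single-pass accumulator with an early return inside the scan.
import Mathlib
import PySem

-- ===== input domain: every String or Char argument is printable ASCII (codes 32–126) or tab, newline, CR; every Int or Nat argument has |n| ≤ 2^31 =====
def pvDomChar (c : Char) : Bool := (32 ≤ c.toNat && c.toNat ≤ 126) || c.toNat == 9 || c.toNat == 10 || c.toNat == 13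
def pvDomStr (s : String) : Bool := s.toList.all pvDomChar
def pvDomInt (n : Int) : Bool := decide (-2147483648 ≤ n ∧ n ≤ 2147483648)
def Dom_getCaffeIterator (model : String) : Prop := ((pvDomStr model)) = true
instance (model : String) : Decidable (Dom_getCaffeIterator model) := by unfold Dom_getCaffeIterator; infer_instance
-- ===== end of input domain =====

-- B re-decomposes A's fused scan into tokenize (maximal ASCII-digit runs) then select (first run with nonzero value); alternative structure, same O(n) cost.


-- ===== PORT A =====
-- A: fused single pass with accumulator and early return on non-digit when ret ≠ 0
def getCaffeIteratorLoop : List Char → Int → Int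
  | [], ret => ret
  | c :: cs, ret =>
    if '0' ≤ c ∧ c ≤ '9' then getCaffeIteratorLoop cs (ret * 10 + ((c.toNat : Int) - 48))
    else if ret ≠ 0 then ret
    else getCaffeIteratorLoop cs ret

def getCaffeIterator (model : String) : Int :=
  getCaffeIteratorLoop model.toList 0

-- ===== PORT B =====
-- B: tokenize into maximal digit runs, then select the first run with nonzero value
def altRuns : List Char → List Char → List (List Char)
  | [], cur => if cur ≠ [] then [cur] else []
  | c :: cs, cur =>
    if '0' ≤ c ∧ c ≤ '9' then altRuns cs (cur ++ [c])
    else (if cur ≠ [] then [cur] else []) ++ altRuns cs []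

-- int(r) for a digit string r
def runVal (r : List Char) : Int :=
  r.foldl (fun a c => a * 10 + ((c.toNat : Int) - 48)) 0

def altSelect : List (List Char) → Int
  | [] => 0
  | r :: rs => let v := runVal r; if v ≠ 0 then v else altSelect rs

def getCaffeIterator_alt (model : String) : Int :=
  altSelect (altRuns model.toList [])

-- ===== PRECONDITION & SPEC =====
def Spec_getCaffeIterator (model : String) (out : Int) : Prop := out = getCaffeIterator_alt model
instance (model : String) (out : Int) : Decidable (Spec_getCaffeIterator model out) := by unfold Spec_getCaffeIterator; infer_instance

-- ===== CLAIM (what is proved, stated in full; the proofs are below) =====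
def Claim_equal_getCaffeIterator : Prop := ∀ (model : String), Dom_getCaffeIterator model → Spec_getCaffeIterator model (getCaffeIterator model)

-- ===== LEMMAS AND PROOFS =====
-- val of a run extended by one digit
theorem runVal_append (r : List Char) (c : Char) :
    runVal (r ++ [c]) = runVal r * 10 + ((c.toNat : Int) - 48) := by
  simp [runVal, List.foldl_append]

-- invariant: with runVal cur = ret, A's loop equals B's select over the remaining runs
theorem loop_eq_select (cs : List Char) (cur : List Char) (ret : Int)
    (h : runVal cur = ret) :
    getCaffeIteratorLoop cs ret = altSelect (altRuns cs cur) := by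
  induction cs generalizing cur ret with
  | nil =>
    by_cases hr : ret = 0
    · subst hr
      simp only [getCaffeIteratorLoop, altRuns]
      by_cases hc : cur = []
      · simp [hc, altSelect]
      · simp [hc, altSelect, h]
    · have hcur : cur ≠ [] := by
        intro hc; subst hc; simp [runVal] at h; omega
      simp [getCaffeIteratorLoop, altRuns, hcur, altSelect, h, hr]
  | cons c cs ih =>
    by_cases hd : '0' ≤ c ∧ c ≤ '9'
    · simp only [getCaffeIteratorLoop, altRuns, if_pos hd]
      exact ih (cur ++ [c]) _ (by rw [runVal_append, h])
    · simp only [getCaffeIteratorLoop, altRuns, if_neg hd]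
      by_cases hr : ret = 0
      · subst hr
        simp only [ne_eq, not_true_eq_false, if_false]
        by_cases hc : cur = []
        · simpa [hc] using ih [] 0 (by simp [runVal])
        · simp only [if_pos hc, List.cons_append, List.nil_append, altSelect, h]
          simpa using ih [] 0 (by simp [runVal])
      · have hcur : cur ≠ [] := by
          intro hc; subst hc; simp [runVal] at h; omega
        simp [hr, hcur, altSelect, h]

-- ===== VERDICT (by name: the statement is the Claim_ definition above) =====
theorem getCaffeIterator_spec : Claim_equal_getCaffeIterator := by
  intro model _
  unfold Spec_getCaffeIterator getCaffeIterator getCaffeIterator_alt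
  exact loop_eq_select model.toList [] 0 (by simp [runVal])
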